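-- pv_equiv track=rewrite | github.com/Diandra-Dimitriu/MPI-Project | DPLL.py | splitting
-- ===== SOURCE A (Python) =====
-- def cond(g):
--     if len(g) == 0:
--         return 1  # condition for satisfiability
--     else:
--         j = 0
--         for i in range(len(g)):
--             if len(g[i]) == 0:
--                 j = j + 1
--         if j == len(g):  # condition for unsatisfiability
--             return -1
--         else:
--             return 0
--
-- def count(g, r, b):  # b and r have to be 2 empty lists
--     for i in range(len(g)):
--         for j in range(len(g[i])):
--             if g[i][j] not in r:
--                 r.append(g[i][j])  # put every variable that exists in r
--     for l in range(len(r)):  # count how many times each variable is in g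
--         nr = 0
--         for i in range(len(g)):
--             for j in range(len(g[i])):
--                 if g[i][j] == r[l]:
--                     nr += 1
--         b.append(nr)
--
-- def maximum(b):  # index of the biggest number in a list
--     max_val = -1
--     j = -1
--     for i in range(len(b)):
--         if b[i] > max_val:
--             max_val = b[i]
--             j = i
--     return j
--
-- def splitting(g):
--     variables = []
--     variable_counts = []
--     count(g, variables, variable_counts)
--
--     if not variables:
--         return cond(g)
--
--     #choose the variable with the highest occurrence
--     max_index = maximum(variable_counts)
--     selected_var = variables[max_index]
--
--     #attempt setting selected_var to True
--     g_true = []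
--     for clause in g:
--         if selected_var in clause:
--             continue  # clause satisfied
--         new_clause = []
--         for literal in clause:
--             if literal != -selected_var:
--                 new_clause.append(literal)
--         g_true.append(new_clause)
--
--     if cond(g_true) == 1:
--         return 1
--     elif cond(g_true) == 0:
--         if splitting(g_true) == 1:
--             return 1
--
--     # attempt setting selected_var to False
--     g_false = []
--     for clause in g:
--         if -selected_var in clause:
--             continue  # clause satisfied
--         new_clause = []
--         for literal in clause:
--             if literal != selected_var:
--                 new_clause.append(literal)
--         g_false.append(new_clause)
--
--     if cond(g_false) == 1:
--         return 1
--     elif cond(g_false) == 0: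
--         if splitting(g_false) == 1:
--             return 1
--
--     return -1
-- ===== SOURCE B (Python) =====
-- def splitting(g):
--     stack = [g]
--     while stack:
--         f = stack.pop()
--         # unit propagation: repeatedly assign the literal of a one-literal clause
--         while True:
--             unit = next((c[0] for c in f if len(c) == 1), None)
--             if unit is None:
--                 break
--             f = [[l for l in c if l != -unit] for c in f if unit not in c]
--         if not f:
--             return 1
--         if any(not c for c in f):
--             continue  # dead branch: contains an empty clause
--         lit = f[0][0]
--         stack.append([[l for l in c if l != lit] for c in f if -lit not in c])
--         stack.append([[l for l in c if l != -lit] for c in f if lit not in c])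
--     return -1
-- ===== Notes on version B (the rewrite author's own statement) =====
-- stated objective: faster
-- what changed: B replaces A's recursive max-occurrence DPLL (which rescans the whole formula once per variable to count occurrences and pre-screens each branch with cond) by an iterative explicit-stack DPLL with unit propagation and first-literal branching; the proof shows both return 1 exactly on satisfiable formulas (literal 0 counting as true) and -1 otherwise, so the different heuristic and control flow give the same value.
import Mathlib
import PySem

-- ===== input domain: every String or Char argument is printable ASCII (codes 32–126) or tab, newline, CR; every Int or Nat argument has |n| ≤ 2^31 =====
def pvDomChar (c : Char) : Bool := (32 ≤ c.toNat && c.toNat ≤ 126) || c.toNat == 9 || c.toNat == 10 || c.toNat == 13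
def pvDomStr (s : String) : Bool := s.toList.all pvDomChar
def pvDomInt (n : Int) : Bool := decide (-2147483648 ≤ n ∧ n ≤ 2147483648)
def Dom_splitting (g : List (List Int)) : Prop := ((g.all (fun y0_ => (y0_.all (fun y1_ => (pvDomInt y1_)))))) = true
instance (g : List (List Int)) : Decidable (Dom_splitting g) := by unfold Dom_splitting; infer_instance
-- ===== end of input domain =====

-- B replaces A's recursive max-occurrence DPLL (per-variable rescans + cond pre-screening) by an
-- iterative explicit-stack DPLL with unit propagation and first-literal branching (objective: faster).

-- ===== PORT A =====
-- shared helper: both ports' termination lemmas are phrased through the clause reduction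
-- (reduceB g val = assign literal `val` true: drop satisfied clauses, delete falsified literals);
-- it is also B's list comprehension '[[l for l in c if l != -val] for c in f if val not in c]'
def reduceB (g : List (List Int)) (val : Int) : List (List Int) :=
  (g.filter (fun c => !(decide (val ∈ c)))).map (fun c => c.filter (fun l => decide (l ≠ -val)))

-- total number of literals: the termination measure of both ports
def sumLen (g : List (List Int)) : Nat := (g.map List.length).sum

theorem sumLen_reduce_le (g : List (List Int)) (val : Int) :
    sumLen (reduceB g val) ≤ sumLen g := by
  induction g with
  | nil => simp [reduceB, sumLen]
  | cons c rest ih =>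
    by_cases h : val ∈ c <;>
      simp only [reduceB, sumLen, List.filter_cons, h, decide_true, decide_false, Bool.not_true,
        Bool.not_false, List.map, List.sum_cons] at ih ⊢ <;>
      [skip; exact Nat.add_le_add (List.length_filter_le _ _) ih]
    exact le_trans ih (Nat.le_add_left _ _)

theorem sumLen_reduce_lt (g : List (List Int)) (val x : Int)
    (hx : x ∈ g.flatten) (hc : x = val ∨ x = -val) :
    sumLen (reduceB g val) < sumLen g := by
  induction g with
  | nil => simp at hx
  | cons c rest ih =>
    simp only [List.flatten_cons, List.mem_append] at hx
    by_cases h : val ∈ c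
    · have h1 : sumLen (reduceB (c :: rest) val) = sumLen (reduceB rest val) := by
        simp [reduceB, sumLen, h]
      have hc1 : 0 < c.length := List.length_pos_of_mem h
      have := sumLen_reduce_le rest val
      simp only [sumLen, List.map_cons, List.sum_cons] at *
      omega
    · have h1 : sumLen (reduceB (c :: rest) val) =
          (c.filter (fun l => decide (l ≠ -val))).length + sumLen (reduceB rest val) := by
        simp [reduceB, sumLen, h]
      rcases hx with hx | hx
      · -- x ∈ c, x ≠ val (val ∉ c), so x = -val and the filter strictly shrinks c
        have hxv : x = -val := by rcases hc with rfl | rfl; exact absurd hx h; rfl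
        have hlt : (c.filter (fun l => decide (l ≠ -val))).length < c.length := by
          rw [List.length_filter_lt_length_iff_exists]
          exact ⟨x, hx, by simp [hxv]⟩
        have := sumLen_reduce_le rest val
        simp only [sumLen, List.map_cons, List.sum_cons] at *
        omega
      · have := ih hx
        have h2 := List.length_filter_le (fun l => decide (l ≠ -val)) c
        simp only [sumLen, List.map_cons, List.sum_cons] at *
        omega

def condA (g : List (List Int)) : Int :=
  if PySem.List.len g = 0 then 1
  else
    let j := g.foldl (fun j c => if PySem.List.len c = 0 then j + 1 else j) (0 : Int)
    if j = PySem.List.len g then -1 else 0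

def countA (g : List (List Int)) : List Int × List Int :=
  let r := g.foldl (fun r c => c.foldl (fun r x => if x ∈ r then r else r ++ [x]) r) ([] : List Int)
  let b := r.foldl (fun b v =>
      let nr := g.foldl (fun nr c => c.foldl (fun nr x => if x = v then nr + 1 else nr) nr) (0 : Int)
      b ++ [nr]) ([] : List Int)
  (r, b)

def maximumA (b : List Int) : Int :=
  (b.foldl (fun s x => if s.1 < x then (x, s.2.2, s.2.2 + 1) else (s.1, s.2.1, s.2.2 + 1))
    ((-1 : Int), (-1 : Int), (0 : Int))).2.1

-- A collects r by first occurrence: that is exactly PySem.Set.ofList of the flattened formula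
theorem countA_fst (g : List (List Int)) : (countA g).1 = PySem.Set.ofList g.flatten := by
  have hadd : (fun (r : List Int) x => if x ∈ r then r else r ++ [x]) = PySem.Set.add := by
    funext r x
    by_cases h : x ∈ r <;> simp [PySem.Set.add, PySem.Set.contains, h]
  rw [countA, PySem.Set.ofList_eq_foldl, ← List.foldl_flatten, hadd]

theorem countA_snd (g : List (List Int)) :
    (countA g).2 = (countA g).1.map (fun v => (g.flatten.count v : Int)) := by
  have hnr : ∀ v : Int, g.foldl (fun nr c => c.foldl (fun nr x => if x = v then nr + 1 else nr) nr) (0 : Int)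
      = (g.flatten.count v : Int) := by
    intro v
    rw [← List.foldl_flatten, PySem.List.foldl_ite_add_one (p := fun x => x = v)]
    have hbeq : (fun x : Int => decide (x = v)) = (fun x => x == v) := by
      funext x; rw [beq_eq_decide]
    simp [List.count_eq_countP, hbeq]
  calc (countA g).2
      = ((countA g).1).foldl (fun b v =>
      b ++ [g.foldl (fun nr c => c.foldl (fun nr x => if x = v then nr + 1 else nr) nr) (0 : Int)]) ([] : List Int) := rfl
    _ = ((countA g).1).foldl (fun b v => b ++ [(g.flatten.count v : Int)]) [] := by
        apply PySem.List.foldl_congr_mem; intro acc v _; rw [hnr]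
    _ = _ := by
        rw [PySem.List.foldl_append_singleton_eq_map]
        simp [countA]

-- A's index-of-maximum fold, applied to `vs.map f` with f ≥ 0, selects the first arg-max of f on vs
theorem maximum_sel (f : Int → Int) (vs : List Int) (hne : vs ≠ []) (hf : ∀ v ∈ vs, 0 ≤ f v) :
    ∃ (m : Int) (k : Nat), k < vs.length ∧ vs[k]? = some m ∧
      PySem.List.max? vs f = some m ∧
      (vs.map f).foldl (fun s x => if s.1 < x then (x, s.2.2, s.2.2 + 1) else (s.1, s.2.1, s.2.2 + 1))
        ((-1 : Int), (-1 : Int), (0 : Int)) = (f m, (k : Int), (vs.length : Int)) := by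
  induction vs using List.reverseRecOn with
  | nil => exact absurd rfl hne
  | append_singleton vs x ih =>
    by_cases hvs : vs = []
    · subst hvs
      have hx : (0 : Int) ≤ f x := hf x (by simp)
      refine ⟨x, 0, by simp, by simp, by simp [PySem.List.max?], ?_⟩
      simp [show (-1 : Int) < f x by omega]
    · obtain ⟨m, k, hk, hget, hmax, hfold⟩ := ih hvs (fun v hv => hf v (by simp [hv]))
      have hstep : ((vs ++ [x]).map f).foldl
          (fun s x => if s.1 < x then (x, s.2.2, s.2.2 + 1) else (s.1, s.2.1, s.2.2 + 1))
          ((-1 : Int), (-1 : Int), (0 : Int))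
          = if f m < f x then (f x, (vs.length : Int), (vs.length : Int) + 1)
            else (f m, (k : Int), (vs.length : Int) + 1) := by
        rw [List.map_append, List.foldl_append, hfold]
        by_cases hlt : f m < f x <;> simp [hlt]
      have hmax' : PySem.List.max? (vs ++ [x]) f
          = if f m < f x then some x else some m := by
        rw [PySem.List.max?, List.foldl_append]
        rw [show vs.foldl _ none = PySem.List.max? vs f from rfl, hmax]
        simp
      by_cases hlt : f m < f x
      · refine ⟨x, vs.length, by simp, by simp,
          by simp [hmax', hlt], ?_⟩
        rw [hstep]
        simp [hlt]
      · refine ⟨m, k, by simp; omega, by rw [List.getElem?_append_left hk]; exact hget,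
          by simp [hmax', hlt], ?_⟩
        rw [hstep]
        simp [hlt]

-- the variable A selects: pyGetD at the arg-max index IS the first arg-max of the count key
theorem selected_spec (g : List (List Int)) (h : (countA g).1 ≠ []) :
    ∃ m, m ∈ g.flatten ∧
      PySem.List.pyGetD (countA g).1 (maximumA (countA g).2) 0 = m ∧
      PySem.List.max? ((countA g).1) (fun v => (g.flatten.count v : Int)) = some m := by
  obtain ⟨m, k, hk, hget, hmax, hfold⟩ := maximum_sel (fun v => (g.flatten.count v : Int))
    (countA g).1 h (fun v _ => Int.natCast_nonneg _)
  refine ⟨m, ?_, ?_, hmax⟩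
  · have hmvs : m ∈ (countA g).1 := List.mem_of_getElem? hget
    rw [countA_fst] at hmvs
    exact (PySem.Set.mem_ofList _ _).mp hmvs
  · have hidx : maximumA (countA g).2 = (k : Int) := by
      rw [countA_snd, maximumA, hfold]
    rw [hidx, PySem.List.pyGetD_natCast, List.getD_eq_getElem?_getD, hget]
    rfl

-- the variable A selects occurs in the formula (used by A's decreasing_by)
theorem selected_mem_flatten (g : List (List Int)) (h : (countA g).1 ≠ []) :
    PySem.List.pyGetD (countA g).1 (maximumA (countA g).2) 0 ∈ g.flatten := by
  obtain ⟨m, hm, he, _⟩ := selected_spec g h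
  rw [he]; exact hm

def buildTrue (g : List (List Int)) (v : Int) : List (List Int) :=
  g.foldl (fun acc clause => if v ∈ clause then acc
    else acc ++ [clause.foldl (fun nc l => if l ≠ -v then nc ++ [l] else nc) ([] : List Int)])
    ([] : List (List Int))

def buildFalse (g : List (List Int)) (v : Int) : List (List Int) :=
  g.foldl (fun acc clause => if -v ∈ clause then acc
    else acc ++ [clause.foldl (fun nc l => if l ≠ v then nc ++ [l] else nc) ([] : List Int)])
    ([] : List (List Int))

theorem foldl_inner_filter (v : Int) (c : List Int) :
    c.foldl (fun nc l => if l ≠ v then nc ++ [l] else nc) ([] : List Int)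
      = c.filter (fun l => decide (l ≠ v)) := by
  simpa using PySem.List.foldl_append_ite_eq_filter (fun l => l ≠ v) c []

theorem buildTrue_eq (g : List (List Int)) (v : Int) : buildTrue g v = reduceB g v := by
  rw [buildTrue, reduceB]
  calc g.foldl (fun acc clause => if v ∈ clause then acc
      else acc ++ [clause.foldl (fun nc l => if l ≠ -v then nc ++ [l] else nc) ([] : List Int)]) []
      = g.foldl (fun acc clause => if ¬ (v ∈ clause) then
          acc ++ [clause.filter (fun l => decide (l ≠ -v))] else acc) [] := by
        apply PySem.List.foldl_congr_mem
        intro acc c _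
        rw [foldl_inner_filter, ite_not]
    _ = _ := by
        rw [PySem.List.foldl_append_ite (p := fun c => ¬ (v ∈ c))]
        simp

theorem buildFalse_eq (g : List (List Int)) (v : Int) : buildFalse g v = reduceB g (-v) := by
  rw [buildFalse, reduceB]
  calc g.foldl (fun acc clause => if -v ∈ clause then acc
      else acc ++ [clause.foldl (fun nc l => if l ≠ v then nc ++ [l] else nc) ([] : List Int)]) []
      = g.foldl (fun acc clause => if ¬ (-v ∈ clause) then
          acc ++ [clause.filter (fun l => decide (l ≠ v))] else acc) [] := by
        apply PySem.List.foldl_congr_mem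
        intro acc c _
        rw [foldl_inner_filter, ite_not]
    _ = _ := by
        rw [PySem.List.foldl_append_ite (p := fun c => ¬ (-v ∈ c))]
        simp

def splitting (g : List (List Int)) : Int :=
  let vc := countA g
  if h : vc.1 = [] then condA g
  else
    let maxIndex := maximumA vc.2
    let selectedVar := PySem.List.pyGetD vc.1 maxIndex 0
    let gTrue := buildTrue g selectedVar
    let gFalse := buildFalse g selectedVar
    let elseRes :=
      if condA gFalse = 1 then 1
      else if condA gFalse = 0 then (if splitting gFalse = 1 then (1 : Int) else -1)
      else -1
    if condA gTrue = 1 then 1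
    else if condA gTrue = 0 then (if splitting gTrue = 1 then 1 else elseRes)
    else elseRes
termination_by sumLen g
decreasing_by
  · rw [buildFalse_eq]
    exact sumLen_reduce_lt g _ _ (selected_mem_flatten g h) (Or.inr (neg_neg _).symm)
  · rw [buildTrue_eq]
    exact sumLen_reduce_lt g _ _ (selected_mem_flatten g h) (Or.inl rfl)

-- ===== PORT B =====
-- next((c[0] for c in f if len(c) == 1), None); the pyGetD default is never used: the clause has length 1
def unitB (f : List (List Int)) : Option Int :=
  (f.find? (fun c => PySem.List.len c == 1)).map (fun c => PySem.List.pyGetD c 0 0)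

theorem unitB_singleton (f : List (List Int)) (u : Int) (h : unitB f = some u) : [u] ∈ f := by
  rw [unitB, Option.map_eq_some_iff] at h
  obtain ⟨c, hc, hu⟩ := h
  have hlen : c.length = 1 := by
    have := List.find?_some hc
    simpa [PySem.List.len_eq] using this
  obtain ⟨a, rfl⟩ := List.length_eq_one_iff.mp hlen
  have hu' : a = u := by simpa [PySem.List.pyGetD, PySem.List.pyGet?, PySem.List.pyIdx?] using hu
  subst hu'
  exact List.mem_of_find?_eq_some hc

-- inner while loop of B: unit propagation
def propagate (f : List (List Int)) : List (List Int) :=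
  match h : unitB f with
  | none => f
  | some u => propagate (reduceB f u)
termination_by sumLen f
decreasing_by
  exact sumLen_reduce_lt f u u (List.mem_flatten.mpr ⟨[u], unitB_singleton f u h, by simp⟩)
    (Or.inl rfl)

theorem pow3_lt (a b s : Nat) (ha : a < s) (hb : b < s) : 3 ^ a + 3 ^ b < 3 ^ s := by
  have h1 : 3 ^ a ≤ 3 ^ (s - 1) := Nat.pow_le_pow_right (by omega) (by omega)
  have h2 : 3 ^ b ≤ 3 ^ (s - 1) := Nat.pow_le_pow_right (by omega) (by omega)
  have h3 : 3 * 3 ^ (s - 1) = 3 ^ s := by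
    rw [← pow_succ']
    congr 1
    omega
  have h4 : 0 < 3 ^ (s - 1) := pow_pos (by omega : (0:Nat) < 3) _
  omega

theorem propagate_sumLen_le (f : List (List Int)) : sumLen (propagate f) ≤ sumLen f := by
  fun_induction propagate f with
  | case1 f h => exact le_refl _
  | case2 f u h ih =>
    exact le_trans ih (le_of_lt (sumLen_reduce_lt f u u
      (List.mem_flatten.mpr ⟨[u], unitB_singleton f u h, by simp⟩) (Or.inl rfl)))

theorem lit_mem_flatten (f : List (List Int)) (hne : f ≠ [])
    (hemp : [] ∉ f) :
    PySem.List.pyGetD (PySem.List.pyGetD f 0 []) 0 0 ∈ f.flatten := by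
  obtain ⟨c, t, rfl⟩ : ∃ c t, f = c :: t := by
    cases f with
    | nil => exact absurd rfl hne
    | cons c t => exact ⟨c, t, rfl⟩
  have hc : c ≠ [] := fun h => hemp (by simp [h])
  obtain ⟨a, t', rfl⟩ : ∃ a t', c = a :: t' := by
    cases c with
    | nil => exact absurd rfl hc
    | cons a t' => exact ⟨a, t', rfl⟩
  have h1 : PySem.List.pyGetD ((a :: t') :: t) 0 [] = a :: t' := by
    simp [PySem.List.pyGetD, PySem.List.pyGet?, PySem.List.pyIdx?]
  have h2 : PySem.List.pyGetD (a :: t') 0 0 = a := by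
    simp [PySem.List.pyGetD, PySem.List.pyGet?, PySem.List.pyIdx?]
  rw [h1, h2]
  simp

-- outer while loop of B: explicit-stack DFS (Lean list head = top of Python's stack)
def dfsB (stack : List (List (List Int))) : Int :=
  match stack with
  | [] => -1
  | f :: rest =>
    let f' := propagate f
    if f' = [] then 1
    else if f'.any (fun c => c.isEmpty) then dfsB rest
    else
      let lit := PySem.List.pyGetD (PySem.List.pyGetD f' 0 []) 0 0
      dfsB (reduceB f' lit :: reduceB f' (-lit) :: rest)
termination_by (stack.map (fun f => 3 ^ sumLen f)).sum
decreasing_by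
  · simp only [List.map_cons, List.sum_cons]
    have : 0 < 3 ^ sumLen f := pow_pos (by omega : (0:Nat) < 3) _
    omega
  · rename_i hne hemp
    simp only [List.map_cons, List.sum_cons]
    have hemp' : [] ∉ propagate f := by simpa using hemp
    have hmem := lit_mem_flatten (propagate f) hne hemp'
    have h1 : sumLen (reduceB (propagate f)
        (PySem.List.pyGetD (PySem.List.pyGetD (propagate f) 0 []) 0 0)) < sumLen (propagate f) :=
      sumLen_reduce_lt _ _ _ hmem (Or.inl rfl)
    have h2 : sumLen (reduceB (propagate f)
        (-(PySem.List.pyGetD (PySem.List.pyGetD (propagate f) 0 []) 0 0))) < sumLen (propagate f) :=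
      sumLen_reduce_lt _ _ _ hmem (Or.inr (neg_neg _).symm)
    have h3 := propagate_sumLen_le f
    have h4 := pow3_lt _ _ _ h1 h2
    have h5 : (3:Nat) ^ sumLen (propagate f) ≤ 3 ^ sumLen f :=
      Nat.pow_le_pow_right (by omega) h3
    omega

def splitting_alt (g : List (List Int)) : Int := dfsB [g]

-- ===== PRECONDITION & SPEC =====
def Spec_splitting (g : List (List Int)) (out : Int) : Prop := out = splitting_alt g
instance (g : List (List Int)) (out : Int) : Decidable (Spec_splitting g out) := by unfold Spec_splitting; infer_instance

-- ===== CLAIM (what is proved, stated in full; the proofs are below) =====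
def Claim_equal_splitting : Prop := ∀ (g : List (List Int)), Dom_splitting g → Spec_splitting g (splitting g)

-- ===== LEMMAS AND PROOFS =====

-- Semantic satisfiability. Both programs effectively treat the (degenerate) literal 0 as true:
-- A sets it true in both branches, B's reduction by 0 drops every clause containing 0.
def litTrue (sg : Int → Bool) (l : Int) : Bool :=
  if l = 0 then true else if 0 < l then sg l else !sg (-l)

def satF (sg : Int → Bool) (g : List (List Int)) : Prop :=
  ∀ c ∈ g, ∃ l ∈ c, litTrue sg l = true

def SATF (g : List (List Int)) : Prop := ∃ sg, satF sg g

theorem litTrue_neg (sg : Int → Bool) (v : Int) (hv : v ≠ 0) :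
    litTrue sg (-v) = !litTrue sg v := by
  unfold litTrue
  rcases lt_trichotomy v 0 with h | h | h
  · rw [if_neg (by omega : ¬ -v = 0), if_pos (by omega : (0:Int) < -v), if_neg hv,
      if_neg (by omega : ¬ (0:Int) < v), Bool.not_not]
  · exact absurd h hv
  · rw [if_neg (by omega : ¬ -v = 0), if_neg (by omega : ¬ (0:Int) < -v), if_neg hv,
      if_pos h, neg_neg]

theorem mem_reduceB {g : List (List Int)} {v : Int} {c : List Int}
    (hc : c ∈ g) (hv : v ∉ c) : c.filter (fun l => decide (l ≠ -v)) ∈ reduceB g v := by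
  exact List.mem_map_of_mem (List.mem_filter.mpr ⟨hc, by simpa using hv⟩)

theorem reduceB_mem {g : List (List Int)} {v : Int} {c' : List Int} (h : c' ∈ reduceB g v) :
    ∃ c ∈ g, v ∉ c ∧ c' = c.filter (fun l => decide (l ≠ -v)) := by
  rw [reduceB, List.mem_map] at h
  obtain ⟨c, hc, rfl⟩ := h
  have := List.mem_filter.mp hc
  exact ⟨c, this.1, by simpa using this.2, rfl⟩

theorem satF_reduce_of_lit {sg : Int → Bool} {g : List (List Int)} {v : Int}
    (hlit : litTrue sg v = true) (hs : satF sg g) : satF sg (reduceB g v) := by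
  intro c' hc'
  obtain ⟨c, hcg, hvc, rfl⟩ := reduceB_mem hc'
  obtain ⟨l, hl, hlt⟩ := hs c hcg
  refine ⟨l, List.mem_filter.mpr ⟨hl, ?_⟩, hlt⟩
  simp only [decide_eq_true_eq]
  intro hlv
  by_cases hv0 : v = 0
  · subst hv0; simp at hlv; exact hvc (hlv ▸ hl)
  · rw [hlv, litTrue_neg sg v hv0, hlit] at hlt
    simp at hlt

-- flip the branch variable to true, leave every other variable alone
def updAssign (sg : Int → Bool) (v : Int) : Int → Bool :=
  fun x => if x = |v| then decide (0 < v) else sg x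

theorem litTrue_upd_self (sg : Int → Bool) (v : Int) : litTrue (updAssign sg v) v = true := by
  unfold litTrue updAssign
  rcases lt_trichotomy v 0 with h | h | h
  · rw [if_neg (by omega : ¬ v = 0), if_neg (by omega : ¬ (0:Int) < v),
      if_pos (abs_of_neg h).symm]
    simp [show ¬ (0:Int) < v by omega]
  · simp [h]
  · rw [if_neg (by omega : ¬ v = 0), if_pos h, if_pos (abs_of_pos h).symm]
    simp [h]

theorem litTrue_upd_other (sg : Int → Bool) (v l : Int) (h1 : l ≠ v) (h2 : l ≠ -v) :
    litTrue (updAssign sg v) l = litTrue sg l := by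
  have habs : ∀ x : Int, 0 < x → x ≠ v → x ≠ -v → ¬ x = |v| := by
    intro x _ hx1 hx2 hx
    rcases abs_choice v with ha | ha <;> rw [ha] at hx <;> omega
  by_cases hl0 : l = 0
  · simp [litTrue, hl0]
  · by_cases hlp : 0 < l
    · simp [litTrue, hl0, hlp, updAssign, habs l hlp h1 h2]
    · have : ¬ (-l) = |v| := habs (-l) (by omega) (by omega) (by omega)
      simp [litTrue, hl0, hlp, updAssign, this]

theorem SATF_of_reduce (g : List (List Int)) (v : Int) :
    SATF (reduceB g v) → SATF g := by
  rintro ⟨sg, hs⟩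
  refine ⟨updAssign sg v, fun c hcg => ?_⟩
  by_cases hvc : v ∈ c
  · exact ⟨v, hvc, litTrue_upd_self sg v⟩
  · obtain ⟨l, hl, hlt⟩ := hs _ (mem_reduceB hcg hvc)
    have hl' := List.mem_filter.mp hl
    have hlv : l ≠ -v := by simpa using hl'.2
    have hlv2 : l ≠ v := fun h => hvc (h ▸ hl'.1)
    exact ⟨l, hl'.1, by rw [litTrue_upd_other sg v l hlv2 hlv]; exact hlt⟩

theorem SATF_branch (g : List (List Int)) (v : Int) :
    SATF g ↔ SATF (reduceB g v) ∨ SATF (reduceB g (-v)) := by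
  constructor
  · rintro ⟨sg, hs⟩
    by_cases hcase : litTrue sg v = true
    · exact Or.inl ⟨sg, satF_reduce_of_lit hcase hs⟩
    · have hv0 : v ≠ 0 := by intro h; subst h; simp [litTrue] at hcase
      have hneg : litTrue sg (-v) = true := by
        rw [litTrue_neg sg v hv0]
        simp only [Bool.not_eq_true] at hcase
        simp [hcase]
      exact Or.inr ⟨sg, satF_reduce_of_lit hneg hs⟩
  · rintro (h | h)
    exacts [SATF_of_reduce g v h, SATF_of_reduce g (-v) h]

theorem SATF_nil : SATF [] := ⟨fun _ => true, fun c hc => by simp at hc⟩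

theorem not_SATF_of_nil_mem {g : List (List Int)} (h : [] ∈ g) : ¬ SATF g := by
  rintro ⟨sg, hs⟩
  obtain ⟨l, hl, _⟩ := hs [] h
  simp at hl

theorem SATF_unit {g : List (List Int)} {u : Int} (h : [u] ∈ g) :
    SATF g ↔ SATF (reduceB g u) := by
  constructor
  · rintro ⟨sg, hs⟩
    obtain ⟨l, hl, hlt⟩ := hs _ h
    simp only [List.mem_singleton] at hl
    subst hl
    exact ⟨sg, satF_reduce_of_lit hlt hs⟩
  · exact SATF_of_reduce g u

theorem SATF_iff_flatten_nil {g : List (List Int)} (hF : g.flatten = []) :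
    SATF g ↔ g = [] := by
  constructor
  · intro hS
    by_contra hne
    obtain ⟨c, t, rfl⟩ : ∃ c t, g = c :: t := by
      cases g with
      | nil => exact absurd rfl hne
      | cons c t => exact ⟨c, t, rfl⟩
    have hc : c = [] := (List.flatten_eq_nil_iff.mp hF) c (by simp)
    exact not_SATF_of_nil_mem (hc ▸ (by simp : c ∈ c :: t)) hS
  · rintro rfl
    exact SATF_nil

-- ---- A-side characterisation ----

theorem condA_eq (g : List (List Int)) :
    condA g = if g = [] then 1 else if g.flatten = [] then -1 else 0 := by
  by_cases hg : g = []
  · simp [condA, hg]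
  · have hlen : PySem.List.len g ≠ 0 := by
      simp [PySem.List.len_eq]
      exact hg
    rw [condA, if_neg hlen]
    simp only [PySem.List.foldl_ite_add_one (p := fun c : List Int => PySem.List.len c = 0)]
    have hcnt : List.countP (fun c => decide (PySem.List.len c = 0)) g = g.length ↔
        g.flatten = [] := by
      rw [List.countP_eq_length, List.flatten_eq_nil_iff]
      refine forall_congr' fun c => imp_congr Iff.rfl ?_
      simp [PySem.List.len_eq, List.length_eq_zero_iff]
    by_cases hF : g.flatten = []
    · have hc := hcnt.mpr hF
      have hcond : (0 : Int) + (List.countP (fun c => decide (PySem.List.len c = 0)) g : Int)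
          = PySem.List.len g := by
        simp only [PySem.List.len_eq] at hc ⊢
        omega
      rw [if_pos hcond, if_neg hg, if_pos hF]
    · have hne' : List.countP (fun c => decide (PySem.List.len c = 0)) g ≠ g.length :=
        fun hEq => hF (hcnt.mp hEq)
      have hcond : ¬((0 : Int) + (List.countP (fun c => decide (PySem.List.len c = 0)) g : Int)
          = PySem.List.len g) := by
        intro hEq
        apply hne'
        simp only [PySem.List.len_eq] at hEq ⊢
        omega
      rw [if_neg hcond, if_neg hg, if_neg hF]

theorem condA_cases (g : List (List Int)) : condA g = 1 ∨ condA g = 0 ∨ condA g = -1 := by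
  rw [condA_eq]; split_ifs <;> simp

theorem ofList_ne_nil {F : List Int} (hF : F ≠ []) : PySem.Set.ofList F ≠ [] := by
  cases F with
  | nil => exact absurd rfl hF
  | cons a t =>
    intro h0
    have : a ∈ PySem.Set.ofList (a :: t) := (PySem.Set.mem_ofList _ _).mpr (by simp)
    rw [h0] at this
    simp at this

theorem splitting_base (g : List (List Int)) (hF : g.flatten = []) :
    splitting g = if g = [] then 1 else -1 := by
  have h1 : (countA g).1 = [] := by rw [countA_fst, hF]; rfl
  rw [splitting, dif_pos h1, condA_eq]
  by_cases hg : g = [] <;> simp [hg, hF]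

theorem splitting_of_cond1 (g : List (List Int)) (h : condA g = 1) : splitting g = 1 := by
  rw [condA_eq] at h
  by_cases h1 : g = []
  · rw [splitting_base g (by rw [h1]; rfl), if_pos h1]
  · by_cases h2 : g.flatten = [] <;> simp [h1, h2] at h

theorem splitting_of_condm1 (g : List (List Int)) (h : condA g = -1) : splitting g = -1 := by
  rw [condA_eq] at h
  by_cases h1 : g = []
  · simp [h1] at h
  · by_cases h2 : g.flatten = []
    · rw [splitting_base g h2, if_neg h1]
    · simp [h1, h2] at h

theorem splitting_vals (g : List (List Int)) : splitting g = 1 ∨ splitting g = -1 := by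
  by_cases hF : g.flatten = []
  · rw [splitting_base g hF]
    split_ifs <;> simp
  · have hvs : (countA g).1 ≠ [] := by rw [countA_fst]; exact ofList_ne_nil hF
    rw [splitting, dif_neg hvs]
    dsimp only
    split_ifs <;> simp

theorem splitting_one_iff (g : List (List Int)) : splitting g = 1 ↔ SATF g := by
  generalize hn : sumLen g = n
  induction n using Nat.strong_induction_on generalizing g with
  | _ n ih =>
  subst hn
  by_cases hF : g.flatten = []
  · rw [splitting_base g hF, SATF_iff_flatten_nil hF]
    by_cases hg : g = [] <;> simp [hg]
  · have hvs : (countA g).1 ≠ [] := by rw [countA_fst]; exact ofList_ne_nil hF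
    obtain ⟨m, hmF, hsel, _⟩ := selected_spec g hvs
    have ihT : splitting (reduceB g m) = 1 ↔ SATF (reduceB g m) :=
      ih _ (sumLen_reduce_lt g m m hmF (Or.inl rfl)) _ rfl
    have ihF : splitting (reduceB g (-m)) = 1 ↔ SATF (reduceB g (-m)) :=
      ih _ (sumLen_reduce_lt g (-m) m hmF (Or.inr (neg_neg m).symm)) _ rfl
    rw [splitting, dif_neg hvs]
    simp only [hsel, buildTrue_eq, buildFalse_eq]
    rw [SATF_branch g m, ← ihT, ← ihF]
    have t1 : condA (reduceB g m) = 1 → splitting (reduceB g m) = 1 := splitting_of_cond1 _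
    have t2 : condA (reduceB g m) = -1 → splitting (reduceB g m) = -1 := splitting_of_condm1 _
    have t3 : condA (reduceB g (-m)) = 1 → splitting (reduceB g (-m)) = 1 := splitting_of_cond1 _
    have t4 : condA (reduceB g (-m)) = -1 → splitting (reduceB g (-m)) = -1 := splitting_of_condm1 _
    rcases condA_cases (reduceB g m) with h1 | h1 | h1 <;>
      rcases condA_cases (reduceB g (-m)) with h2 | h2 | h2 <;>
      simp only [h1, h2, t1, t2, t3, t4] <;>
      split_ifs <;> simp_all

-- ---- B-side characterisation ----

theorem propagate_SAT (f : List (List Int)) : SATF (propagate f) ↔ SATF f := by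
  fun_induction propagate f with
  | case1 f h => exact Iff.rfl
  | case2 f u h ih => exact ih.trans (SATF_unit (unitB_singleton f u h)).symm

theorem dfsB_vals (st : List (List (List Int))) : dfsB st = 1 ∨ dfsB st = -1 := by
  fun_induction dfsB st with
  | case1 => exact Or.inr rfl
  | case2 f rest f' h => exact Or.inl rfl
  | case3 f rest f' hne hany ih => exact ih
  | case4 f rest f' hne hany lit ih => exact ih

theorem dfsB_one_iff (st : List (List (List Int))) :
    dfsB st = 1 ↔ ∃ f ∈ st, SATF f := by
  fun_induction dfsB st with
  | case1 => simp
  | case2 f rest f' h =>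
    have hP : propagate f = [] := h
    simp only [List.mem_cons]
    constructor
    · intro _
      exact ⟨f, Or.inl rfl, (propagate_SAT f).mp (hP ▸ SATF_nil)⟩
    · intro _; trivial
  | case3 f rest f' hne hany ih =>
    have hany' : ((propagate f).any fun c => c.isEmpty) = true := hany
    have hnil : [] ∈ propagate f := by
      rw [List.any_eq_true] at hany'
      obtain ⟨c, hc, hce⟩ := hany'
      simpa [List.isEmpty_iff.mp (by simpa using hce)] using hc
    have hns : ¬ SATF f := fun hs => not_SATF_of_nil_mem hnil ((propagate_SAT f).mpr hs)
    rw [ih]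
    constructor
    · rintro ⟨f0, hm, hs⟩
      exact ⟨f0, by simp [hm], hs⟩
    · rintro ⟨f0, hm, hs⟩
      rcases List.mem_cons.mp hm with rfl | hm'
      · exact absurd hs hns
      · exact ⟨f0, hm', hs⟩
  | case4 f rest f' hne hany lit ih =>
    rw [ih]
    have hbr : SATF f ↔ SATF (reduceB f' lit) ∨ SATF (reduceB f' (-lit)) :=
      (propagate_SAT f).symm.trans (SATF_branch f' lit)
    simp only [List.mem_cons, exists_eq_or_imp]
    tauto

theorem splitting_alt_vals (g : List (List Int)) :
    splitting_alt g = 1 ∨ splitting_alt g = -1 := dfsB_vals [g]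

theorem splitting_alt_one_iff (g : List (List Int)) : splitting_alt g = 1 ↔ SATF g := by
  rw [splitting_alt, dfsB_one_iff]
  simp

theorem splitting_main (g : List (List Int)) : splitting g = splitting_alt g := by
  by_cases hS : SATF g
  · rw [(splitting_one_iff g).mpr hS, (splitting_alt_one_iff g).mpr hS]
  · rcases splitting_vals g with h | h
    · exact absurd ((splitting_one_iff g).mp h) hS
    · rcases splitting_alt_vals g with h' | h'
      · exact absurd ((splitting_alt_one_iff g).mp h') hS
      · rw [h, h']

-- ===== VERDICT (by name: the statement is the Claim_ definition above) =====
theorem splitting_spec : Claim_equal_splitting := by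
  intro g _
  exact splitting_main g
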